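-- pv_equiv track=rewrite | github.com/RickF-dotcom/motor-fgi | maturacao.py | _frequencia_anterior
-- ===== SOURCE A (Python) =====
-- from typing import List, Dict, Literal, Tuple
--
-- def _frequencia_anterior(historico: List[List[int]], tamanho_janela: int) -> Dict[int, int]:
--     """
--     Frequência em uma janela anterior à atual, para ter 'trend'.
--     Ex.: se tamanho_janela=10, olha os 10 concursos imediatamente anteriores aos últimos 10.
--     Se não houver espaço suficiente, retorna zeros.
--     """
--     if len(historico) < 2 * tamanho_janela:
--         return {d: 0 for d in range(1, 26)}
--
--     inicio = len(historico) - 2 * tamanho_janela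
--     fim = len(historico) - tamanho_janela
--     janela = historico[inicio:fim]
--     contagem = {d: 0 for d in range(1, 26)}
--     for concurso in janela:
--         for d in concurso:
--             if 1 <= d <= 25:
--                 contagem[d] += 1
--     return contagem
-- ===== SOURCE B (Python) =====
-- def _frequencia_anterior(historico, tamanho_janela):
--     if len(historico) < 2 * tamanho_janela:
--         return {d: 0 for d in range(1, 26)}
--     janela = historico[len(historico) - 2 * tamanho_janela : len(historico) - tamanho_janela]
--     return {d: sum(c.count(d) for c in janela) for d in range(1, 26)}
-- ===== Notes on version B (the rewrite author's own statement) =====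
-- stated objective: alternative
-- what changed: Replaces the accumulating dict-increment double loop (table of 25 counters updated in one pass with a 1..25 range check) by a dict comprehension that, for each dezena 1..25, sums list.count over the window draws; no mutable counter table and no range filter.
import Mathlib
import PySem

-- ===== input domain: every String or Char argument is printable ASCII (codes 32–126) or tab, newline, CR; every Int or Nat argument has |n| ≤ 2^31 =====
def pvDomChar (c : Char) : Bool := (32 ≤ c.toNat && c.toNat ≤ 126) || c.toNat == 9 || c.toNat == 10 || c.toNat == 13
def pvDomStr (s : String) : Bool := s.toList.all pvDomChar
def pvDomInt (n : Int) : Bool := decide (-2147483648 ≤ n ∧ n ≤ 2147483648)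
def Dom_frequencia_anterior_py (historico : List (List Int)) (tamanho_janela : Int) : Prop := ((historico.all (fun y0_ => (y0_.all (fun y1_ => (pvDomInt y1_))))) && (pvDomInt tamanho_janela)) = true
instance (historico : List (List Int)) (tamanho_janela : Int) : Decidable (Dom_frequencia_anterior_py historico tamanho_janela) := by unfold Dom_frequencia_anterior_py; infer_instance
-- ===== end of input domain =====

-- B replaces A's single accumulating pass over the window (a mutable 25-entry counter table
-- with a 1..25 range check) by a per-dezena comprehension summing list.count over the window
-- draws; same return value, no speed claim (objective: alternative).

-- ===== PORT A =====
-- `contagem[d] += 1` is ported as `modify d 0 (· + 1)`: the key is always present (the dict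
-- holds exactly 1..25 and the branch requires 1 ≤ d ≤ 25), so Python never raises here.
def frequencia_anterior_py (historico : List (List Int)) (tamanho_janela : Int) : List (Int × Int) :=
  if (historico.length : Int) < 2 * tamanho_janela then
    (PySem.List.pyRange 1 26 1).map (fun d => (d, (0 : Int)))
  else
    let inicio := (historico.length : Int) - 2 * tamanho_janela
    let fim := (historico.length : Int) - tamanho_janela
    let janela := PySem.List.slice historico (some inicio) (some fim)
    let contagem := (PySem.List.pyRange 1 26 1).foldl
      (fun d k => d.insert k (0 : Int)) PySem.Dict.empty
    (janela.foldl (fun d concurso =>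
        concurso.foldl (fun d x => if 1 ≤ x ∧ x ≤ 25 then d.modify x 0 (· + 1) else d) d)
      contagem).items

-- ===== PORT B =====
def frequencia_anterior_py_alt (historico : List (List Int)) (tamanho_janela : Int) : List (Int × Int) :=
  if (historico.length : Int) < 2 * tamanho_janela then
    (PySem.List.pyRange 1 26 1).map (fun d => (d, (0 : Int)))
  else
    let janela := PySem.List.slice historico
      (some ((historico.length : Int) - 2 * tamanho_janela))
      (some ((historico.length : Int) - tamanho_janela))
    (PySem.List.pyRange 1 26 1).map
      (fun d => (d, (janela.map (fun c => (c.count d : Int))).sum))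

-- ===== PRECONDITION & SPEC =====
def Spec_frequencia_anterior_py (historico : List (List Int)) (tamanho_janela : Int) (out : List (Int × Int)) : Prop := out = frequencia_anterior_py_alt historico tamanho_janela
instance (historico : List (List Int)) (tamanho_janela : Int) (out : List (Int × Int)) : Decidable (Spec_frequencia_anterior_py historico tamanho_janela out) := by unfold Spec_frequencia_anterior_py; infer_instance

-- ===== CLAIM (what is proved, stated in full; the proofs are below) =====
def Claim_equal_frequencia_anterior_py : Prop := ∀ (historico : List (List Int)) (tamanho_janela : Int), Dom_frequencia_anterior_py historico tamanho_janela → Spec_frequencia_anterior_py historico tamanho_janela (frequencia_anterior_py historico tamanho_janela)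

-- ===== LEMMAS AND PROOFS =====

-- A's nested loop over the window is the single loop over the flattened window.
theorem pv_foldl_flatMap_id {α β : Type} (l : List (List α)) (g : β → α → β) (b : β) :
    (l.flatMap id).foldl g b = l.foldl (fun acc c => c.foldl g acc) b := by
  induction l generalizing b with
  | nil => rfl
  | cons c t ih => simp only [List.flatMap_cons, List.foldl_append, List.foldl_cons, id]; exact ih _

-- B's per-draw sum of counts is the count in the flattened window.
theorem pv_sum_count_flatMap (l : List (List Int)) (d : Int) :
    ((l.flatMap id).count d : Int) = (l.map (fun c => (c.count d : Int))).sum := by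
  induction l with
  | nil => rfl
  | cons c t ih =>
      simp only [List.flatMap_cons, List.count_append, List.map_cons, List.sum_cons, id, ← ih]
      push_cast; ring

-- any literal dict all of whose values are 0 looks up to 0 under default 0
theorem pv_getD_zero_of_all_zero (l : List (Int × Int)) (h : ∀ p ∈ l, p.2 = 0) (d : Int) :
    (PySem.Dict.mk l).getD d 0 = 0 := by
  induction l with
  | nil => rfl
  | cons p t ih =>
      obtain ⟨k, v⟩ := p
      have hv : v = 0 := h (k, v) (List.mem_cons_self)
      rw [PySem.Dict.getD_eq_get?_getD, PySem.Dict.get?_mk_cons]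
      cases hk : (k == d)
      · rw [if_neg (by simp), ← PySem.Dict.getD_eq_get?_getD]
        exact ih (fun q hq => h q (List.mem_cons_of_mem _ hq))
      · simp [hv]

-- the initial counter table of A maps every key to 0
set_option maxHeartbeats 1000000 in
theorem pv_contagem0_getD (d : Int) :
    ((PySem.List.pyRange 1 26 1).foldl (fun d k => d.insert k (0 : Int)) PySem.Dict.empty).getD d 0
      = 0 := by
  rw [show (PySem.List.pyRange 1 26 1).foldl (fun d k => d.insert k (0 : Int)) PySem.Dict.empty
      = PySem.Dict.mk ((PySem.List.pyRange 1 26 1).map (fun d => (d, (0 : Int)))) from by decide]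
  exact pv_getD_zero_of_all_zero _ (by intro p hp; obtain ⟨x, -, rfl⟩ := List.mem_map.1 hp; rfl) d

-- the core of the equivalence: A's counting loop, started from the 1..25 zero table,
-- produces exactly B's per-dezena counts
theorem pv_loop_eq (janela : List (List Int)) :
    ((janela.foldl (fun d concurso =>
        concurso.foldl (fun d x => if 1 ≤ x ∧ x ≤ 25 then d.modify x 0 (· + 1) else d) d)
      ((PySem.List.pyRange 1 26 1).foldl (fun d k => d.insert k (0 : Int)) PySem.Dict.empty)).items)
    = (PySem.List.pyRange 1 26 1).map
        (fun d => (d, (janela.map (fun c => (c.count d : Int))).sum)) := by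
  set C0 := (PySem.List.pyRange 1 26 1).foldl (fun d k => d.insert k (0 : Int)) PySem.Dict.empty with hC0
  rw [← pv_foldl_flatMap_id]
  rw [show (fun (d : PySem.Dict Int Int) (x : Int) => if 1 ≤ x ∧ x ≤ 25 then d.modify x 0 (· + 1) else d)
      = (fun d x => if (decide (1 ≤ x ∧ x ≤ 25)) = true then d.modify x 0 (· + 1) else d) from by
    funext d x; by_cases h : 1 ≤ x ∧ x ≤ 25 <;> simp [h]]
  rw [← List.foldl_filter]
  set F := (janela.flatMap id).filter (fun x => decide (1 ≤ x ∧ x ≤ 25)) with hF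
  have hCk : C0.keys = PySem.List.pyRange 1 26 1 := by decide
  have hFmem : ∀ y ∈ F, y ∈ C0.keys := by
    intro y hy
    rw [hCk, PySem.List.mem_pyRange_one]
    have := List.of_mem_filter hy
    simp only [decide_eq_true_eq] at this
    omega
  have hkeys : (F.foldl (fun d x => d.modify x 0 (· + 1)) C0).keys = C0.keys := by
    rw [PySem.Dict.keys_foldl_modify, PySem.Set.update_eq_append_filter]
    have : (PySem.Set.ofList F).filter (fun y => !(PySem.Set.contains C0.keys y)) = [] := by
      rw [List.filter_eq_nil_iff]
      intro y hy
      have hmem : y ∈ C0.keys := hFmem y ((PySem.Set.mem_ofList _ _).1 hy)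
      simp [PySem.Set.contains_eq_listContains, hmem]
    rw [this, List.append_nil]
  have hnd : (F.foldl (fun d x => d.modify x 0 (· + 1)) C0).keys.Nodup := by
    rw [hkeys, hCk]; exact PySem.List.nodup_pyRange_one 1 26
  rw [PySem.Dict.items_eq_map_keys _ hnd 0, hkeys, hCk]
  apply List.map_congr_left
  intro k hk
  have hk' := (PySem.List.mem_pyRange_one).1 hk
  rw [PySem.Dict.getD_foldl_modify_add_one, pv_contagem0_getD, hF,
    List.count_filter (by simp; omega), pv_sum_count_flatMap, zero_add]

-- ===== VERDICT (by name: the statement is the Claim_ definition above) =====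
theorem frequencia_anterior_py_spec : Claim_equal_frequencia_anterior_py := by
  intro historico tamanho_janela _
  unfold Spec_frequencia_anterior_py frequencia_anterior_py frequencia_anterior_py_alt
  split
  · rfl
  · exact pv_loop_eq _
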